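-- pv_equiv track=rewrite | github.com/eyelovedata/oct-report-ocr | utils.py | rnfl_quadrant_search_range_test
-- ===== SOURCE A (Python) =====
-- def rnfl_quadrant_search_range_test(txts):
--     ct = 0
--
--     for i, s in enumerate(txts):
--         if 'normative' in s.lower():
--             start_index = i-1
--         if 'diversified' in s.lower():
--             start_index = i + 1
--         if 'quadrants' in s.lower():
--             end_index = i+2
--     return start_index, end_index+1
-- ===== SOURCE B (Python) =====
-- def rnfl_quadrant_search_range_test(txts):
--     lows = [s.lower() for s in txts]
--     for i in range(len(lows) - 1, -1, -1):
--         if 'diversified' in lows[i]: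
--             start_index = i + 1
--             break
--         if 'normative' in lows[i]:
--             start_index = i - 1
--             break
--     for i in range(len(lows) - 1, -1, -1):
--         if 'quadrants' in lows[i]:
--             end_index = i + 2
--             break
--     return start_index, end_index + 1
-- ===== Notes on version B (the rewrite author's own statement) =====
-- stated objective: alternative
-- what changed: A's single forward pass that keeps overwriting start_index/end_index is replaced by a lowered-lines list plus two independent backward scans that break at the first hit from the end ('diversified' checked before 'normative'), so last-match-wins becomes first-match-from-the-end.
import Mathlib
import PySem

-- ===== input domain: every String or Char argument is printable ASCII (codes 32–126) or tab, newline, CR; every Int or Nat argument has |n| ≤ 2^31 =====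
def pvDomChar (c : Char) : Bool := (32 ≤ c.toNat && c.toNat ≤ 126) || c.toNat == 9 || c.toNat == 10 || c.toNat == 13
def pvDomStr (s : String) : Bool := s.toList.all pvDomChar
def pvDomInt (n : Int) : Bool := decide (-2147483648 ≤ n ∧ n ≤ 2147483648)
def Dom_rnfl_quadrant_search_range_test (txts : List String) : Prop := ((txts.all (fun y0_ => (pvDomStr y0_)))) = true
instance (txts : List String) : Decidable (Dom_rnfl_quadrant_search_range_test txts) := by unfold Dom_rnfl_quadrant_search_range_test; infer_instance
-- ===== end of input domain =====

-- B replaces A's single forward overwrite loop by two independent backward scans with early exit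
-- (last match wins becomes first match from the end); objective: alternative decomposition, same cost.

-- ===== PORT A =====
-- one forward pass; start_index/end_index are Option (none = Python's unbound name, excluded by Pre_)
def rnfl_quadrant_search_range_test (txts : List String) : Int × Int :=
  let fin := (PySem.List.enumerate txts).foldl
    (fun (acc : Option Int × Option Int) (p : Int × String) =>
      let low := PySem.Str.lower p.2
      let s1 := if PySem.Str.isIn "normative" low then some (p.1 - 1) else acc.1
      let s2 := if PySem.Str.isIn "diversified" low then some (p.1 + 1) else s1
      let e  := if PySem.Str.isIn "quadrants" low then some (p.1 + 2) else acc.2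
      (s2, e)) (none, none)
  (fin.1.getD 0, fin.2.getD 0 + 1)

-- ===== PORT B =====
-- B's first reverse loop with break: first hit from the end, 'diversified' checked before 'normative'
def pvFindStart : List (Int × String) → Option Int
  | [] => none
  | (i, low) :: rest =>
      if PySem.Str.isIn "diversified" low then some (i + 1)
      else if PySem.Str.isIn "normative" low then some (i - 1)
      else pvFindStart rest

-- B's second reverse loop with break
def pvFindEnd : List (Int × String) → Option Int
  | [] => none
  | (i, low) :: rest =>
      if PySem.Str.isIn "quadrants" low then some (i + 2) else pvFindEnd rest

def rnfl_quadrant_search_range_test_alt (txts : List String) : Int × Int :=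
  let lows := txts.map PySem.Str.lower
  let pairs := (PySem.List.enumerate lows).reverse
  ((pvFindStart pairs).getD 0, (pvFindEnd pairs).getD 0 + 1)

-- ===== PRECONDITION & SPEC =====
-- Pre_ excludes exactly the inputs where Python A raises NameError: no line containing
-- 'normative'/'diversified' (start_index unbound) or no line containing 'quadrants' (end_index unbound).
def Pre_rnfl_quadrant_search_range_test (txts : List String) : Prop :=
  (txts.any (fun s => PySem.Str.isIn "normative" (PySem.Str.lower s)
      || PySem.Str.isIn "diversified" (PySem.Str.lower s)) = true)
  ∧ (txts.any (fun s => PySem.Str.isIn "quadrants" (PySem.Str.lower s)) = true)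
instance (txts : List String) : Decidable (Pre_rnfl_quadrant_search_range_test txts) := by
  unfold Pre_rnfl_quadrant_search_range_test; infer_instance

def pvWitness_rnfl_quadrant_search_range_test : List String := ["Normative data", "Quadrants map"]

def Spec_rnfl_quadrant_search_range_test (txts : List String) (out : Int × Int) : Prop := out = rnfl_quadrant_search_range_test_alt txts
instance (txts : List String) (out : Int × Int) : Decidable (Spec_rnfl_quadrant_search_range_test txts out) := by unfold Spec_rnfl_quadrant_search_range_test; infer_instance

-- ===== CLAIM (what is proved, stated in full; the proofs are below) =====
def Claim_equal_rnfl_quadrant_search_range_test : Prop := ∀ (txts : List String), Dom_rnfl_quadrant_search_range_test txts → Pre_rnfl_quadrant_search_range_test txts → Spec_rnfl_quadrant_search_range_test txts (rnfl_quadrant_search_range_test txts)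

-- ===== LEMMAS AND PROOFS =====

theorem pvFindStart_append (l1 l2 : List (Int × String)) :
    pvFindStart (l1 ++ l2) = (pvFindStart l1).or (pvFindStart l2) := by
  induction l1 with
  | nil => simp [pvFindStart]
  | cons x xs ih =>
      obtain ⟨i, low⟩ := x
      simp only [List.cons_append, pvFindStart, ih]
      split_ifs <;> simp

theorem pvFindEnd_append (l1 l2 : List (Int × String)) :
    pvFindEnd (l1 ++ l2) = (pvFindEnd l1).or (pvFindEnd l2) := by
  induction l1 with
  | nil => simp [pvFindEnd]
  | cons x xs ih =>
      obtain ⟨i, low⟩ := x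
      simp only [List.cons_append, pvFindEnd, ih]
      split_ifs <;> simp

-- A's start-accumulator over a (already lowered) pair list is B's backward scan
theorem foldl_start (l : List (Int × String)) (acc : Option Int) :
    l.foldl (fun (a : Option Int) (p : Int × String) =>
        if PySem.Str.isIn "diversified" (PySem.Str.lower p.2) then some (p.1 + 1)
        else if PySem.Str.isIn "normative" (PySem.Str.lower p.2) then some (p.1 - 1) else a) acc
      = (pvFindStart ((l.map (fun p => (p.1, PySem.Str.lower p.2))).reverse)).or acc := by
  induction l generalizing acc with
  | nil => simp [pvFindStart]
  | cons x xs ih =>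
      obtain ⟨i, low⟩ := x
      simp only [List.foldl_cons, ih, List.map_cons, List.reverse_cons, pvFindStart_append]
      simp only [pvFindStart]
      split_ifs <;> simp

theorem foldl_end (l : List (Int × String)) (acc : Option Int) :
    l.foldl (fun (a : Option Int) (p : Int × String) =>
        if PySem.Str.isIn "quadrants" (PySem.Str.lower p.2) then some (p.1 + 2) else a) acc
      = (pvFindEnd ((l.map (fun p => (p.1, PySem.Str.lower p.2))).reverse)).or acc := by
  induction l generalizing acc with
  | nil => simp [pvFindEnd]
  | cons x xs ih =>
      obtain ⟨i, low⟩ := x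
      simp only [List.foldl_cons, ih, List.map_cons, List.reverse_cons, pvFindEnd_append]
      simp only [pvFindEnd]
      split_ifs <;> simp

theorem enumerate_map {α β : Type} (f : α → β) (l : List α) (s : Int) :
    PySem.List.enumerate (l.map f) s = (PySem.List.enumerate l s).map (fun p => (p.1, f p.2)) := by
  induction l generalizing s with
  | nil => simp [PySem.List.enumerate_nil]
  | cons x xs ih => simp [PySem.List.enumerate_cons, ih]

-- ===== VERDICT (by name: the statement is the Claim_ definition above) =====
theorem rnfl_quadrant_search_range_test_spec : Claim_equal_rnfl_quadrant_search_range_test := by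
  intro txts _ _
  unfold Spec_rnfl_quadrant_search_range_test
  unfold rnfl_quadrant_search_range_test rnfl_quadrant_search_range_test_alt
  simp only []
  rw [show (fun (acc : Option Int × Option Int) (p : Int × String) =>
      let low := PySem.Str.lower p.2
      let s1 := if PySem.Str.isIn "normative" low then some (p.1 - 1) else acc.1
      let s2 := if PySem.Str.isIn "diversified" low then some (p.1 + 1) else s1
      let e  := if PySem.Str.isIn "quadrants" low then some (p.1 + 2) else acc.2
      (s2, e))
    = (fun (acc : Option Int × Option Int) (p : Int × String) =>
      (if PySem.Str.isIn "diversified" (PySem.Str.lower p.2) then some (p.1 + 1)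
          else if PySem.Str.isIn "normative" (PySem.Str.lower p.2) then some (p.1 - 1) else acc.1,
       if PySem.Str.isIn "quadrants" (PySem.Str.lower p.2) then some (p.1 + 2) else acc.2))
    from rfl]
  rw [PySem.List.foldl_prod_mk
      (f := fun (a : Option Int) (p : Int × String) =>
          if PySem.Str.isIn "diversified" (PySem.Str.lower p.2) then some (p.1 + 1)
          else if PySem.Str.isIn "normative" (PySem.Str.lower p.2) then some (p.1 - 1) else a)
      (g := fun (a : Option Int) (p : Int × String) =>
          if PySem.Str.isIn "quadrants" (PySem.Str.lower p.2) then some (p.1 + 2) else a)]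
  rw [enumerate_map, foldl_start, foldl_end]
  simp
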